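-- pv_equiv track=rewrite | github.com/sheenaze/qa4sm-reader | src/qa4sm_reader/plotter.py | _comb_title_parts
-- ===== SOURCE A (Python) =====
-- def _comb_title_parts(title_parts, max_len) -> str:
--     title = ''
--     for i, part in enumerate(title_parts):
--         if len(title.split('\n')[-1]) + len(part) > max_len:
--             part += '\n'
--         title = title + part
--     if title[-1:] == '\n':
--         title = title[:-1]
--     return title
-- ===== SOURCE B (Python) =====
-- def _comb_title_parts(title_parts, max_len):
--     pieces = []
--     cur = 0  # length of the last line accumulated so far
--     for part in title_parts:
--         pieces.append(part)
--         if cur + len(part) > max_len: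
--             pieces.append('\n')
--             cur = 0
--         else:
--             nl = part.rfind('\n')
--             cur = cur + len(part) if nl < 0 else len(part) - nl - 1
--     title = ''.join(pieces)
--     if title.endswith('\n'):
--         title = title[:-1]
--     return title
-- ===== Notes on version B (the rewrite author's own statement) =====
-- stated objective: faster
-- what changed: B tracks the current last-line length incrementally (updating it from each appended part's own trailing segment) and joins the pieces once, instead of re-splitting the whole accumulated title on '\n' at every iteration and rebuilding the string by repeated concatenation.
import Mathlib
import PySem

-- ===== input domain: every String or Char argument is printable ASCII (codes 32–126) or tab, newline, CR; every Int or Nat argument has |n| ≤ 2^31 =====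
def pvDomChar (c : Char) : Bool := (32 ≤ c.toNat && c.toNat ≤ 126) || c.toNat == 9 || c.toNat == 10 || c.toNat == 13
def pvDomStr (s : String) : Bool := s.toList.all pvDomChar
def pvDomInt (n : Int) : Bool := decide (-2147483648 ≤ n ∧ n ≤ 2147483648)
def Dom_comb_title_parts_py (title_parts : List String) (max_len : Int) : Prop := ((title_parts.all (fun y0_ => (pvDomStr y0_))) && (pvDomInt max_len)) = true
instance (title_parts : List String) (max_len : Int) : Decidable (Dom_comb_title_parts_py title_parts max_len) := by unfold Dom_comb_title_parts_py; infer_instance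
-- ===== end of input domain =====

-- B tracks the current last-line length incrementally and joins the pieces once,
-- instead of re-splitting the whole accumulated title on '\n' at every iteration (objective: faster).


-- ===== PORT A =====
-- one iteration of A's loop: if len(title.split('\n')[-1]) + len(part) > max_len: part += '\n'; title = title + part
-- (split('\n') never returns an empty list, so the [-1] index never raises; getD covers the impossible none)
def combStepA (max_len : Int) (title part : List Char) : List Char :=
  let lastLine := (PySem.List.pyGet? ((PySem.Chars.split? title ['\n']).getD []) (-1)).getD []
  let part := if ((lastLine.length : Int)) + ((part.length : Int)) > max_len then part ++ ['\n'] else part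
  title ++ part

def comb_title_parts_py (title_parts : List String) (max_len : Int) : String :=
  let title := title_parts.foldl (fun title part => combStepA max_len title part.toList) []
  let title := if PySem.Chars.slice title (some (-1)) none = ['\n']
               then PySem.Chars.slice title none (some (-1)) else title
  String.ofList title

-- ===== PORT B =====
-- one iteration of B's loop over the state (pieces, cur)
def combStepB (max_len : Int) (st : List (List Char) × Int) (part : List Char) : List (List Char) × Int :=
  let pieces := st.1 ++ [part]
  if st.2 + ((part.length : Int)) > max_len then
    (pieces ++ [['\n']], 0)
  else
    let nl := PySem.Chars.rfind part ['\n']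
    (pieces, if nl < 0 then st.2 + ((part.length : Int)) else ((part.length : Int)) - nl - 1)

def comb_title_parts_py_alt (title_parts : List String) (max_len : Int) : String :=
  let st := title_parts.foldl (fun st part => combStepB max_len st part.toList) ([], 0)
  let title := PySem.Chars.join [] st.1
  let title := if PySem.Chars.endswith title ['\n']
               then PySem.Chars.slice title none (some (-1)) else title
  String.ofList title

-- ===== PRECONDITION & SPEC =====
def Spec_comb_title_parts_py (title_parts : List String) (max_len : Int) (out : String) : Prop := out = comb_title_parts_py_alt title_parts max_len
instance (title_parts : List String) (max_len : Int) (out : String) : Decidable (Spec_comb_title_parts_py title_parts max_len out) := by unfold Spec_comb_title_parts_py; infer_instance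

-- ===== CLAIM (what is proved, stated in full; the proofs are below) =====
def Claim_equal_comb_title_parts_py : Prop := ∀ (title_parts : List String) (max_len : Int), Dom_comb_title_parts_py title_parts max_len → Spec_comb_title_parts_py title_parts max_len (comb_title_parts_py title_parts max_len)

-- ===== LEMMAS AND PROOFS =====

-- the last line of l (segment after the last '\n'; l itself if there is none)
def lastSeg (l : List Char) : List Char := (l.reverse.takeWhile (fun c => c != '\n')).reverse

lemma takeWhile_all {q : Char → Bool} : ∀ {l : List Char}, (∀ x ∈ l, q x = true) → l.takeWhile q = l
  | [], _ => rfl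
  | c :: t, h => by
    rw [List.takeWhile_cons, if_pos (h c (by simp)), takeWhile_all (fun x hx => h x (by simp [hx]))]

-- reference spec of splitting on a single '\n': `cur` is the current segment, reversed
def segs : List Char → List Char → List (List Char)
  | cur, [] => [cur.reverse]
  | cur, c :: rest => if c = '\n' then cur.reverse :: segs [] rest else segs (c :: cur) rest

lemma segs_ne_nil (cur l : List Char) : segs cur l ≠ [] := by
  induction l generalizing cur with
  | nil => simp [segs]
  | cons c rest ih =>
    simp only [segs]
    split_ifs
    · simp
    · exact ih _

lemma go_segs (fuel : Nat) : ∀ (l cur : List Char) (acc : List (List Char)), l.length < fuel →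
    PySem.Chars.splitOn.go ['\n'] fuel l cur acc = acc.reverse ++ segs cur l := by
  induction fuel with
  | zero => intro l cur acc h; omega
  | succ f ih =>
    intro l cur acc h
    cases l with
    | nil => simp [PySem.Chars.splitOn.go, segs]
    | cons c rest =>
      by_cases hc : c = '\n'
      · subst hc
        rw [show PySem.Chars.splitOn.go ['\n'] (f+1) ('\n' :: rest) cur acc
              = PySem.Chars.splitOn.go ['\n'] f rest [] (cur.reverse :: acc) from by
            simp [PySem.Chars.splitOn.go, List.isPrefixOf]]
        rw [ih rest [] (cur.reverse :: acc) (by simp at h ⊢; omega)]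
        simp [segs]
      · have hcc : ('\n' == c) = false := beq_eq_false_iff_ne.mpr (fun h' => hc h'.symm)
        rw [show PySem.Chars.splitOn.go ['\n'] (f+1) (c :: rest) cur acc
              = PySem.Chars.splitOn.go ['\n'] f rest (c :: cur) acc from by
            simp [PySem.Chars.splitOn.go, List.isPrefixOf, hcc]]
        rw [ih rest (c :: cur) acc (by simp at h ⊢; omega)]
        simp [segs, hc]

lemma lastSeg_append_newline (t p : List Char) : lastSeg (t ++ (p ++ ['\n'])) = [] := by
  simp [lastSeg]

lemma lastSeg_append_no_nl (t p : List Char) (h : '\n' ∉ p) : lastSeg (t ++ p) = lastSeg t ++ p := by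
  have hall : ∀ x ∈ p.reverse, (x != '\n') = true := by
    intro x hx
    rw [List.mem_reverse] at hx
    simpa using fun he => h (by rw [← he]; exact hx)
  simp only [lastSeg, List.reverse_append]
  rw [List.takeWhile_append, if_pos (by rw [takeWhile_all hall])]
  simp

lemma lastSeg_append_has_nl (t p : List Char) (h : '\n' ∈ p) : lastSeg (t ++ p) = lastSeg p := by
  simp only [lastSeg, List.reverse_append]
  rw [List.takeWhile_append, if_neg ?_]
  intro hlen
  have heq : p.reverse.takeWhile (fun c => c != '\n') = p.reverse :=
    (List.takeWhile_prefix _).eq_of_length hlen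
  have := List.mem_takeWhile_imp (l := p.reverse) (p := fun c => c != '\n')
    (heq ▸ List.mem_reverse.mpr h)
  simp at this

lemma lastSeg_of_no_nl (l : List Char) (h : '\n' ∉ l) : lastSeg l = l := by
  have hall : ∀ x ∈ l.reverse, (x != '\n') = true := by
    intro x hx
    rw [List.mem_reverse] at hx
    simpa using fun he => h (by rw [← he]; exact hx)
  simp only [lastSeg]
  rw [takeWhile_all hall, List.reverse_reverse]

lemma segs_getLast? (l : List Char) : ∀ (cur : List Char), '\n' ∉ cur →
    (segs cur l).getLast? = some (lastSeg (cur.reverse ++ l)) := by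
  induction l with
  | nil =>
    intro cur h
    simp only [segs, List.getLast?_singleton, lastSeg, List.append_nil, List.reverse_reverse]
    rw [takeWhile_all (by
      intro x hx
      simpa using fun he => h (by rw [← he]; exact hx))]
  | cons c rest ih =>
    intro cur h
    by_cases hc : c = '\n'
    · subst hc
      rw [show segs cur ('\n' :: rest) = cur.reverse :: segs [] rest from by simp [segs]]
      obtain ⟨x, xs, hx⟩ := List.exists_cons_of_ne_nil (segs_ne_nil [] rest)
      rw [hx, List.getLast?_cons_cons, ← hx, ih [] (by simp)]
      simp only [List.reverse_nil, List.nil_append, Option.some.injEq]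
      rw [show cur.reverse ++ '\n' :: rest = (cur.reverse ++ ['\n']) ++ rest from by simp]
      by_cases hr : '\n' ∈ rest
      · rw [lastSeg_append_has_nl _ _ hr]
      · rw [lastSeg_append_no_nl _ _ hr,
          show lastSeg (cur.reverse ++ ['\n']) = [] from by
            simpa using lastSeg_append_newline cur.reverse [],
          List.nil_append, lastSeg_of_no_nl rest hr]
    · simp only [segs, if_neg hc]
      rw [ih (c :: cur) (by simp [h]; exact fun he => hc he.symm)]
      simp

lemma splitOn_last (l : List Char) :
    (PySem.List.pyGet? ((PySem.Chars.split? l ['\n']).getD []) (-1)).getD [] = lastSeg l := by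
  have h1 : PySem.Chars.split? l ['\n'] = some (segs [] l) := by
    simp only [PySem.Chars.split?, PySem.Chars.splitOn, List.isEmpty_cons, Bool.false_eq_true,
      if_false, Option.some.injEq]
    exact go_segs (l.length + 1) l [] [] (by omega)
  have h2 := segs_getLast? l [] (by simp)
  simp only [List.reverse_nil, List.nil_append] at h2
  rw [h1, Option.getD_some, PySem.List.pyGet?_neg_one, h2, Option.getD_some]

lemma isPrefixOf_newline (l : List Char) : (['\n'].isPrefixOf l = true) ↔ l.head? = some '\n' := by
  cases l with
  | nil => decide
  | cons a t =>
    show (('\n' == a) && List.isPrefixOf [] t) = true ↔ _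
    rw [show (List.isPrefixOf ([] : List Char) t) = true from rfl, Bool.and_true, beq_iff_eq,
      List.head?_cons, Option.some.injEq]
    exact eq_comm

-- rfind on a single-char needle: the greatest index ≤ j holding '\n'
lemma rfind_go_spec (s : List Char) (j : Nat) :
    PySem.Chars.rfind.go s ['\n'] j =
      if _H : ∃ i, i ≤ j ∧ s[i]? = some '\n'
      then ((Nat.findGreatest (fun i => s[i]? = some '\n') j : Nat) : Int)
      else -1 := by
  induction j with
  | zero =>
    rw [PySem.Chars.rfind.go]
    have hp : (['\n'].isPrefixOf s = true) ↔ s[0]? = some '\n' := by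
      rw [isPrefixOf_newline, List.head?_eq_getElem?]
    by_cases h0 : s[0]? = some '\n'
    · rw [if_pos (hp.mpr h0), dif_pos ⟨0, le_refl 0, h0⟩, Nat.findGreatest_zero]
      exact (Nat.cast_zero).symm
    · rw [if_neg (fun hh => h0 (hp.mp hh)), dif_neg ?_]
      rintro ⟨i, hi, hs⟩
      interval_cases i
      exact h0 hs
  | succ j ih =>
    rw [PySem.Chars.rfind.go]
    have hp : (['\n'].isPrefixOf (s.drop (j+1)) = true) ↔ s[j+1]? = some '\n' := by
      rw [← List.head?_drop, isPrefixOf_newline]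
    by_cases hj : s[j+1]? = some '\n'
    · rw [if_pos (hp.mpr hj), dif_pos ⟨j+1, le_refl _, hj⟩, Nat.findGreatest_succ, if_pos hj]
    · rw [if_neg (fun hh => hj (hp.mp hh)), ih]
      by_cases H : ∃ i, i ≤ j ∧ s[i]? = some '\n'
      · rw [dif_pos H,
          dif_pos (by obtain ⟨i, hi, hs⟩ := H; exact ⟨i, Nat.le_succ_of_le hi, hs⟩),
          Nat.findGreatest_succ, if_neg hj]
      · rw [dif_neg H, dif_neg ?_]
        rintro ⟨i, hi, hs⟩
        rcases Nat.lt_or_ge i (j+1) with hlt | hge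
        · exact H ⟨i, by omega, hs⟩
        · have hieq : i = j + 1 := by omega
          exact hj (hieq ▸ hs)

lemma rfind_newline_neg (p : List Char) : PySem.Chars.rfind p ['\n'] < 0 ↔ '\n' ∉ p := by
  rw [show PySem.Chars.rfind p ['\n'] = PySem.Chars.rfind.go p ['\n'] p.length from rfl,
    rfind_go_spec]
  by_cases H : ∃ i, i ≤ p.length ∧ p[i]? = some '\n'
  · rw [dif_pos H]
    obtain ⟨i, hi, hs⟩ := H
    have hmem : '\n' ∈ p := List.mem_of_getElem? hs
    exact iff_of_false (by omega) (fun hn => hn hmem)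
  · rw [dif_neg H]
    refine iff_of_true (by norm_num) (fun hmem => H ?_)
    obtain ⟨i, hs⟩ := List.mem_iff_getElem?.mp hmem
    have hlt : i < p.length := by
      by_contra hge
      rw [List.getElem?_eq_none (by omega)] at hs
      cases hs
    exact ⟨i, by omega, hs⟩

lemma lastSeg_eq_drop (p : List Char) (k : Nat) (hk : p[k]? = some '\n')
    (hafter : ∀ i, k < i → p[i]? ≠ some '\n') : lastSeg p = p.drop (k+1) := by
  have hall : ∀ x ∈ (p.drop (k+1)).reverse, (x != '\n') = true := by
    intro x hx
    rw [List.mem_reverse] at hx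
    obtain ⟨i, hs⟩ := List.mem_iff_getElem?.mp hx
    rw [List.getElem?_drop] at hs
    have hxne : x ≠ '\n' := fun he => hafter (k+1+i) (by omega) (he ▸ hs)
    simpa using hxne
  have hrev : p.reverse = (p.drop (k+1)).reverse ++ ('\n' :: (p.take k).reverse) := by
    have h2 : p.take (k+1) = p.take k ++ ['\n'] := by
      rw [List.take_add_one, hk]
      rfl
    calc p.reverse = (p.take (k+1) ++ p.drop (k+1)).reverse := by rw [List.take_append_drop]
      _ = (p.drop (k+1)).reverse ++ (p.take (k+1)).reverse := by rw [List.reverse_append]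
      _ = _ := by rw [h2, List.reverse_append]; simp
  unfold lastSeg
  rw [hrev, List.takeWhile_append, if_pos (by rw [takeWhile_all hall])]
  simp

lemma rfind_newline_len (p : List Char) (h : '\n' ∈ p) :
    ((p.length : Int)) - PySem.Chars.rfind p ['\n'] - 1 = (((lastSeg p).length : Int)) := by
  rw [show PySem.Chars.rfind p ['\n'] = PySem.Chars.rfind.go p ['\n'] p.length from rfl,
    rfind_go_spec]
  obtain ⟨i0, hs0⟩ := List.mem_iff_getElem?.mp h
  have hi0 : i0 < p.length := by
    by_contra hge
    rw [List.getElem?_eq_none (by omega)] at hs0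
    cases hs0
  have H : ∃ i, i ≤ p.length ∧ p[i]? = some '\n' := ⟨i0, by omega, hs0⟩
  rw [dif_pos H]
  have hPk : p[Nat.findGreatest (fun i => p[i]? = some '\n') p.length]? = some '\n' :=
    Nat.findGreatest_spec (P := fun i => p[i]? = some '\n') (le_of_lt hi0) hs0
  set k := Nat.findGreatest (fun i => p[i]? = some '\n') p.length with hkdef
  have hklt : k < p.length := by
    by_contra hge
    rw [List.getElem?_eq_none (by omega)] at hPk
    cases hPk
  have hafter : ∀ i, k < i → p[i]? ≠ some '\n' := by
    intro i hi hs
    by_cases hle : i ≤ p.length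
    · have := Nat.le_findGreatest (P := fun i => p[i]? = some '\n') hle hs
      omega
    · rw [List.getElem?_eq_none (by omega)] at hs
      cases hs
  rw [lastSeg_eq_drop p k hPk hafter, List.length_drop]
  omega

lemma join_nil_flatten : ∀ (ps : List (List Char)), PySem.Chars.join [] ps = ps.flatten
  | [] => by simp [PySem.Chars.join, List.intercalate]
  | [a] => by simp [PySem.Chars.join, List.intercalate]
  | a :: b :: u => by
    have ih := join_nil_flatten (b :: u)
    simp only [PySem.Chars.join, List.intercalate] at ih ⊢
    rw [show List.intersperse ([] : List Char) (a :: b :: u)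
          = a :: [] :: List.intersperse [] (b :: u) from by simp [List.intersperse]]
    simp only [List.flatten_cons, List.nil_append, ih, List.flatten_cons]

-- both final guards test the same thing: the accumulated title ends with '\n'
lemma cond_iff (T : List Char) :
    (PySem.Chars.slice T (some (-1)) none = ['\n']) ↔ (PySem.Chars.endswith T ['\n'] = true) := by
  rcases List.eq_nil_or_concat T with rfl | ⟨q, a, rfl⟩
  · simp [PySem.Chars.slice, PySem.List.slice, PySem.Chars.endswith, List.isSuffixOf]
  · simp only [PySem.Chars.slice, List.concat_eq_append]
    rw [PySem.List.slice_from_neg_one, show (q ++ [a]).length - 1 = q.length from by simp,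
      List.drop_left, PySem.Chars.endswith_iff]
    constructor
    · intro h
      have ha : a = '\n' := by simpa using h
      subst ha
      exact ⟨q, rfl⟩
    · rintro ⟨r, hr⟩
      have h2 := congrArg List.getLast? hr
      rw [List.getLast?_concat, List.getLast?_concat] at h2
      rw [← Option.some.inj h2]

-- loop invariant: B's pieces flatten to A's title and B's cur is the length of A's last line
lemma loop_inv (max_len : Int) (parts : List String) :
    ∀ (st : List (List Char) × Int) (title : List Char),
      st.1.flatten = title → st.2 = ((lastSeg title).length : Int) →
      (parts.foldl (fun st part => combStepB max_len st part.toList) st).1.flatten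
          = parts.foldl (fun title part => combStepA max_len title part.toList) title
      ∧ (parts.foldl (fun st part => combStepB max_len st part.toList) st).2
          = ((lastSeg (parts.foldl (fun title part => combStepA max_len title part.toList) title)).length : Int) := by
  induction parts with
  | nil => intro st title h1 h2; exact ⟨h1, h2⟩
  | cons p rest ih =>
    intro st title h1 h2
    simp only [List.foldl_cons]
    have hA : combStepA max_len title p.toList
        = title ++ (if st.2 + ((p.toList.length : Int)) > max_len then p.toList ++ ['\n'] else p.toList) := by
      simp only [combStepA]
      rw [splitOn_last, ← h2]
    by_cases hgt : st.2 + ((p.toList.length : Int)) > max_len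
    · have hB : combStepB max_len st p.toList = (st.1 ++ [p.toList] ++ [['\n']], 0) := by
        simp only [combStepB]
        rw [if_pos hgt]
      rw [hA, if_pos hgt, hB]
      refine ih _ _ ?_ ?_
      · simp [h1]
      · rw [lastSeg_append_newline]
        simp
    · rw [hA, if_neg hgt]
      by_cases hnl : '\n' ∈ p.toList
      · have hge : ¬ PySem.Chars.rfind p.toList ['\n'] < 0 := by
          rw [rfind_newline_neg]
          simpa using hnl
        have hB : combStepB max_len st p.toList
            = (st.1 ++ [p.toList], ((p.toList.length : Int)) - PySem.Chars.rfind p.toList ['\n'] - 1) := by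
          simp only [combStepB]
          rw [if_neg hgt, if_neg hge]
        rw [hB]
        refine ih _ _ ?_ ?_
        · simp [h1]
        · rw [rfind_newline_len p.toList hnl, lastSeg_append_has_nl title p.toList hnl]
      · have hlt : PySem.Chars.rfind p.toList ['\n'] < 0 := (rfind_newline_neg p.toList).mpr hnl
        have hB : combStepB max_len st p.toList
            = (st.1 ++ [p.toList], st.2 + ((p.toList.length : Int))) := by
          simp only [combStepB]
          rw [if_neg hgt, if_pos hlt]
        rw [hB]
        refine ih _ _ ?_ ?_
        · simp [h1]
        · rw [lastSeg_append_no_nl title p.toList hnl, h2]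
          simp

-- ===== VERDICT (by name: the statement is the Claim_ definition above) =====
theorem comb_title_parts_py_spec : Claim_equal_comb_title_parts_py := by
  intro title_parts max_len _
  unfold Spec_comb_title_parts_py
  obtain ⟨h1, -⟩ := loop_inv max_len title_parts ([], 0) [] rfl (by simp [lastSeg])
  simp only [comb_title_parts_py, comb_title_parts_py_alt]
  rw [join_nil_flatten, h1]
  by_cases hc : PySem.Chars.endswith
      (title_parts.foldl (fun title part => combStepA max_len title part.toList) []) ['\n'] = true
  · rw [if_pos hc, if_pos ((cond_iff _).mpr hc)]
  · rw [if_neg hc, if_neg (fun hs => hc ((cond_iff _).mp hs))]
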